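-- pv_equiv track=rewrite | github.com/CodingThrust/problem-reductions | docs/paper/verify-reductions/adversary_max_cut_optimal_linear_arrangement.py | adv_extract
-- ===== SOURCE A (Python) =====
-- def adv_extract(n: int, edges: list[tuple[int, int]], arrangement: list[int]) -> list[int]:
--     """
--     Independent extraction: OLA arrangement → MaxCut partition.
--     Pick the positional cut with maximum crossing edges.
--     """
--     if n <= 1:
--         return [0] * n
--
--     best_pos = 0
--     best_val = -1
--     for cut_pos in range(n - 1):
--         c = 0
--         for u, v in edges:
--             fu, fv = arrangement[u], arrangement[v]
--             if (fu <= cut_pos) != (fv <= cut_pos):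
--                 c += 1
--         if c > best_val:
--             best_val = c
--             best_pos = cut_pos
--
--     return [0 if arrangement[v] <= best_pos else 1 for v in range(n)]
-- ===== SOURCE B (Python) =====
-- def adv_extract(n: int, edges: list[tuple[int, int]], arrangement: list[int]) -> list[int]:
--     """
--     Independent extraction: OLA arrangement -> MaxCut partition.
--     Difference array over cut positions + one prefix-sum scan: O(n + E).
--     """
--     if n <= 1:
--         return [0] * n
--
--     diff = [0] * n
--     for u, v in edges:
--         fu, fv = arrangement[u], arrangement[v]
--         lo = max(min(fu, fv), 0)
--         hi = min(max(fu, fv) - 1, n - 2)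
--         if lo <= hi:
--             diff[lo] += 1
--             diff[hi + 1] -= 1
--
--     best_pos, best_val, acc = 0, -1, 0
--     for cut in range(n - 1):
--         acc += diff[cut]
--         if acc > best_val:
--             best_val = acc
--             best_pos = cut
--
--     return [0 if arrangement[v] <= best_pos else 1 for v in range(n)]
-- ===== Notes on version B (the rewrite author's own statement) =====
-- stated objective: faster
-- what changed: Replaces the per-cut rescan of all edges (O(n*E)) by a difference array indexed by cut position filled in one pass over the edges, followed by a single prefix-sum scan that picks the first maximal cut.
import Mathlib
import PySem

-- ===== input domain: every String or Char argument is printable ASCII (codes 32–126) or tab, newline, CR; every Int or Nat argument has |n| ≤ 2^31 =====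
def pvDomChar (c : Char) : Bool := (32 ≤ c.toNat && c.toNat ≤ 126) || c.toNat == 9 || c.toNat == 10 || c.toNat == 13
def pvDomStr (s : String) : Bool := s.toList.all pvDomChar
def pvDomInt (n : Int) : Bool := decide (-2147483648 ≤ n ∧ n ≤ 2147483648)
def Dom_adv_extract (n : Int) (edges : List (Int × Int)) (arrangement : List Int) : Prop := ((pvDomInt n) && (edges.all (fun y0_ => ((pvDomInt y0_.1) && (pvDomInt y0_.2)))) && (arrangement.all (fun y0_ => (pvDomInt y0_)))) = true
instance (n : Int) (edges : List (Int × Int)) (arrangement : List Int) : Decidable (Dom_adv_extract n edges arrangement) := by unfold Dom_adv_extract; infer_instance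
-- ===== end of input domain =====

-- B replaces A's per-cut rescan of all edges (O(n·E)) by a difference array over cut
-- positions filled in one pass over the edges plus a single prefix-sum scan (O(n+E)).

-- ===== PORT A =====
-- A-side helper: the inner 'for u, v in edges' counting loop at a fixed cut position
def pvCntA (edges : List (Int × Int)) (arrangement : List Int) (cut_pos : Int) : Int :=
  edges.foldl (fun (c : Int) e =>
    let fu := PySem.List.pyGetD arrangement e.1 0
    let fv := PySem.List.pyGetD arrangement e.2 0
    if (decide (fu ≤ cut_pos)) != (decide (fv ≤ cut_pos)) then c + 1 else c) 0

def adv_extract (n : Int) (edges : List (Int × Int)) (arrangement : List Int) : List Int :=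
  if n ≤ 1 then List.replicate n.toNat 0
  else
    let st := (PySem.List.pyRange 0 (n - 1) 1).foldl (fun (st : Int × Int) cut_pos =>
      let c := pvCntA edges arrangement cut_pos
      if c > st.2 then (cut_pos, c) else st) (0, -1)
    (PySem.List.pyRange 0 n 1).map (fun v =>
      if PySem.List.pyGetD arrangement v 0 ≤ st.1 then 0 else 1)

-- ===== PORT B =====
-- B-side helper: one edge's update of the difference array
def pvDiffUpd (n : Int) (arrangement : List Int) (d : List Int) (e : Int × Int) : List Int :=
  let fu := PySem.List.pyGetD arrangement e.1 0
  let fv := PySem.List.pyGetD arrangement e.2 0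
  let lo := max (min fu fv) 0
  let hi := min (max fu fv - 1) (n - 2)
  if lo ≤ hi then
    let d1 := PySem.List.pySetD d lo (PySem.List.pyGetD d lo 0 + 1)
    PySem.List.pySetD d1 (hi + 1) (PySem.List.pyGetD d1 (hi + 1) 0 - 1)
  else d

-- B-side helper: one step of the prefix-sum scan, state (best_pos, best_val, acc)
def pvScanStep (diff : List Int) (st : Int × Int × Int) (cut : Int) : Int × Int × Int :=
  let acc := st.2.2 + PySem.List.pyGetD diff cut 0
  if acc > st.2.1 then (cut, acc, acc) else (st.1, st.2.1, acc)

def adv_extract_alt (n : Int) (edges : List (Int × Int)) (arrangement : List Int) : List Int :=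
  if n ≤ 1 then List.replicate n.toNat 0
  else
    let diff := edges.foldl (pvDiffUpd n arrangement) (List.replicate n.toNat 0)
    let st := (PySem.List.pyRange 0 (n - 1) 1).foldl (pvScanStep diff) (0, -1, 0)
    (PySem.List.pyRange 0 n 1).map (fun v =>
      if PySem.List.pyGetD arrangement v 0 ≤ st.1 then 0 else 1)

-- ===== PRECONDITION & SPEC =====
-- Pre_ excludes exactly the inputs where Python A raises IndexError: when n > 1,
-- arrangement must have at least n elements and every edge endpoint must be a
-- valid (possibly negative) Python index into arrangement.
def Pre_adv_extract (n : Int) (edges : List (Int × Int)) (arrangement : List Int) : Prop :=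
  1 < n → (n ≤ (arrangement.length : Int) ∧
    ∀ e ∈ edges, PySem.Raise.InRange arrangement.length e.1 ∧ PySem.Raise.InRange arrangement.length e.2)
instance (n : Int) (edges : List (Int × Int)) (arrangement : List Int) : Decidable (Pre_adv_extract n edges arrangement) := by unfold Pre_adv_extract; infer_instance
def pvWitness_adv_extract : Int × (List (Int × Int)) × List Int := (3, [(0, 1), (1, 2)], [1, 0, 2])

def Spec_adv_extract (n : Int) (edges : List (Int × Int)) (arrangement : List Int) (out : List Int) : Prop := out = adv_extract_alt n edges arrangement
instance (n : Int) (edges : List (Int × Int)) (arrangement : List Int) (out : List Int) : Decidable (Spec_adv_extract n edges arrangement out) := by unfold Spec_adv_extract; infer_instance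

-- ===== CLAIM (what is proved, stated in full; the proofs are below) =====
def Claim_equal_adv_extract : Prop := ∀ (n : Int) (edges : List (Int × Int)) (arrangement : List Int), Dom_adv_extract n edges arrangement → Pre_adv_extract n edges arrangement → Spec_adv_extract n edges arrangement (adv_extract n edges arrangement)

-- ===== LEMMAS AND PROOFS =====

-- sum of a prefix after a point update
lemma sum_take_set (d : List Int) (p k : Nat) (x : Int) (hp : p < d.length) :
    ((d.set p x).take k).sum = (d.take k).sum + (if p < k then x - d.getD p 0 else 0) := by
  induction d generalizing p k with
  | nil => simp at hp
  | cons a d ih =>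
    cases p with
    | zero =>
      cases k with
      | zero => simp
      | succ j => simp [List.getD]; omega
    | succ p =>
      cases k with
      | zero => simp
      | succ j =>
        have h := ih p j (by simp at hp; omega)
        simp [List.getD] at h ⊢
        omega

lemma sum_take_succD (d : List Int) (m : Nat) (hm : m < d.length) :
    (d.take (m + 1)).sum = (d.take m).sum + d.getD m 0 := by
  rw [List.sum_take_succ _ _ hm, List.getD_eq_getElem _ _ hm]

lemma pyGetD_eq_getD (d : List Int) (i : Int) (h0 : 0 ≤ i) (h : i < (d.length : Int)) :
    PySem.List.pyGetD d i 0 = d.getD i.toNat 0 := by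
  rw [PySem.List.pyGetD_eq_getElem _ _ h0 h, List.getD_eq_getElem _ _ (by omega)]

lemma foldl_count_shift (es : List (Int × Int)) (p : (Int × Int) → Bool) (a : Int) :
    es.foldl (fun c e => if p e then c + 1 else c) a
      = a + es.foldl (fun c e => if p e then c + 1 else c) 0 := by
  induction es generalizing a with
  | nil => simp
  | cons e es ih =>
    simp only [List.foldl_cons]
    rw [ih, ih (if p e then 0 + 1 else 0)]
    split <;> omega

lemma cntA_cons (e : Int × Int) (es : List (Int × Int)) (arr : List Int) (cut : Int) :
    pvCntA (e :: es) arr cut =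
      (if (decide (PySem.List.pyGetD arr e.1 0 ≤ cut)) != (decide (PySem.List.pyGetD arr e.2 0 ≤ cut))
        then 1 else 0) + pvCntA es arr cut := by
  unfold pvCntA
  simp only [List.foldl_cons]
  rw [foldl_count_shift (p := fun e => (decide (PySem.List.pyGetD arr e.1 0 ≤ cut)) != (decide (PySem.List.pyGetD arr e.2 0 ≤ cut)))]
  split <;> omega

lemma diffUpd_length (n : Int) (arr d : List Int) (e : Int × Int) :
    (pvDiffUpd n arr d e).length = d.length := by
  simp only [pvDiffUpd]
  split <;> simp [PySem.List.length_pySetD]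

lemma diff_length (n : Int) (arr : List Int) (es : List (Int × Int)) (d : List Int) :
    (es.foldl (pvDiffUpd n arr) d).length = d.length := by
  induction es generalizing d with
  | nil => rfl
  | cons e es ih => simp only [List.foldl_cons]; rw [ih, diffUpd_length]

-- one edge's update changes the prefix sum up to cut by exactly its crossing indicator
lemma diffUpd_prefix (n : Int) (arr d : List Int) (e : Int × Int) (cut : Int)
    (hd : d.length = n.toNat) (h0 : 0 ≤ cut) (h2 : cut ≤ n - 2) :
    ((pvDiffUpd n arr d e).take (cut.toNat + 1)).sum
      = (d.take (cut.toNat + 1)).sum +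
        (if (decide (PySem.List.pyGetD arr e.1 0 ≤ cut)) != (decide (PySem.List.pyGetD arr e.2 0 ≤ cut))
          then 1 else 0) := by
  have hn : 2 ≤ n := by omega
  simp only [pvDiffUpd]
  generalize PySem.List.pyGetD arr e.1 0 = fu
  generalize PySem.List.pyGetD arr e.2 0 = fv
  by_cases hle : max (min fu fv) 0 ≤ min (max fu fv - 1) (n - 2)
  · rw [if_pos hle]
    have hlo0 : (0 : Int) ≤ max (min fu fv) 0 := le_max_right _ _
    have hhi0 : (0 : Int) ≤ min (max fu fv - 1) (n - 2) + 1 := by omega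
    have hlolen : (max (min fu fv) 0).toNat < d.length := by omega
    rw [PySem.List.pySetD_of_nonneg d _ hlo0,
        pyGetD_eq_getD d _ hlo0 (by omega),
        PySem.List.pySetD_of_nonneg _ _ hhi0,
        pyGetD_eq_getD _ _ hhi0 (by simp; omega),
        sum_take_set _ _ _ _ (by simp; omega),
        sum_take_set d _ _ _ hlolen]
    by_cases h1 : fu ≤ cut <;> by_cases h2' : fv ≤ cut <;>
      simp only [h1, h2', decide_true, decide_false, bne_self_eq_false, Bool.bne_false,
        Bool.false_bne, Bool.bne_true, Bool.not_true, Bool.not_false] <;>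
      split_ifs <;> first | contradiction | omega
  · rw [if_neg hle]
    by_cases h1 : fu ≤ cut <;> by_cases h2' : fv ≤ cut <;> simp [h1, h2'] <;> omega

-- prefix sums of the difference array equal A's inner counting loop
lemma diff_prefix (n : Int) (arr : List Int) (es : List (Int × Int)) (d : List Int)
    (hd : d.length = n.toNat) (cut : Int) (h0 : 0 ≤ cut) (h2 : cut ≤ n - 2) :
    ((es.foldl (pvDiffUpd n arr) d).take (cut.toNat + 1)).sum
      = (d.take (cut.toNat + 1)).sum + pvCntA es arr cut := by
  induction es generalizing d with
  | nil => simp [pvCntA]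
  | cons e es ih =>
    simp only [List.foldl_cons]
    rw [ih _ (by rw [diffUpd_length]; exact hd)]
    rw [diffUpd_prefix n arr d e cut hd h0 h2, cntA_cons]
    ring

lemma take_replicate_sum (m k : Nat) : ((List.replicate m (0 : Int)).take k).sum = 0 := by
  rw [List.take_replicate]
  simp

-- the scan over cut positions computes the same (best_pos, best_val) as A's loop
lemma scan_eq (n : Int) (edges : List (Int × Int)) (arr : List Int) (hn : 1 < n) :
    ∀ (m : Nat), (m : Int) ≤ n - 1 →
      (PySem.List.pyRange 0 (m : Int) 1).foldl
          (pvScanStep (edges.foldl (pvDiffUpd n arr) (List.replicate n.toNat 0))) (0, -1, 0)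
        = (((PySem.List.pyRange 0 (m : Int) 1).foldl (fun (st : Int × Int) cut_pos =>
              let c := pvCntA edges arr cut_pos
              if c > st.2 then (cut_pos, c) else st) (0, -1)).1,
           ((PySem.List.pyRange 0 (m : Int) 1).foldl (fun (st : Int × Int) cut_pos =>
              let c := pvCntA edges arr cut_pos
              if c > st.2 then (cut_pos, c) else st) (0, -1)).2,
           ((edges.foldl (pvDiffUpd n arr) (List.replicate n.toNat 0)).take m).sum) := by
  intro m
  induction m with
  | zero =>
    intro _
    simp [PySem.List.pyRange_one_eq_nil (le_refl (0 : Int))]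
  | succ m ih =>
    intro hm
    have hm' : (m : Int) ≤ n - 1 := by push_cast at hm ⊢; omega
    set diff := edges.foldl (pvDiffUpd n arr) (List.replicate n.toNat 0) with hdiff
    have hdl : diff.length = n.toNat := by rw [hdiff, diff_length]; simp
    have hrange : PySem.List.pyRange 0 ((m : Int) + 1) 1
        = PySem.List.pyRange 0 (m : Int) 1 ++ [(m : Int)] :=
      PySem.List.pyRange_one_succ_right (by omega)
    have hcast : (((m : Nat) + 1 : Nat) : Int) = ((m : Nat) : Int) + 1 := by push_cast; ring
    rw [hcast, hrange, List.foldl_append, List.foldl_append, ih hm']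
    have hmlt : m < diff.length := by omega
    have hacc : ((diff.take m).sum + PySem.List.pyGetD diff (m : Int) 0)
        = (diff.take (m + 1)).sum := by
      rw [sum_take_succD _ _ hmlt, PySem.List.pyGetD_natCast]
    have hcnt : (diff.take (m + 1)).sum = pvCntA edges arr (m : Int) := by
      have hmt : ((m : Int).toNat + 1) = m + 1 := by omega
      rw [← hmt, hdiff, diff_prefix n arr edges _ (by simp) (m : Int) (by omega) (by omega),
        take_replicate_sum]
      simp
    simp only [List.foldl_cons, List.foldl_nil, pvScanStep, hacc, hcnt]
    split <;> simp_all

-- ===== VERDICT (by name: the statement is the Claim_ definition above) =====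
theorem adv_extract_spec : Claim_equal_adv_extract := by
  intro n edges arrangement _ _
  unfold Spec_adv_extract adv_extract adv_extract_alt
  by_cases hn : n ≤ 1
  · simp [hn]
  · rw [if_neg hn, if_neg hn]
    have h1 : 1 < n := by omega
    have hs := scan_eq n edges arrangement h1 (n - 1).toNat (by omega)
    have hc : (((n - 1).toNat : Nat) : Int) = n - 1 := by omega
    rw [hc] at hs
    simp only [hs]
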